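-- pv_equiv track=rewrite | github.com/hugomrj/iasanic | app/normalizador.py | reemplazar_sinonimos
-- ===== SOURCE A (Python) =====
-- def reemplazar_sinonimos(nombre: str) -> str:
--     """Reemplaza palabras por sin贸nimos estandarizados."""
--     grupos = {
--       "ventas": ["facturacion", "ingresos"],
--       "compras": ["compra"],
--       "productos": ["articulos", "articulo", "item", "items"],
--       "vendedor": ["comercial"],
--       "sucursal": ["local", "tienda"],
--       "cantidad": ["volumen"],
--       "mejores": ["top"],
--     }
--
--     partes = nombre.split("_")  # separamos por guiones bajos
--
--     for i, palabra in enumerate(partes):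
--         for reemplazo, sinonimos in grupos.items():
--             if palabra in sinonimos:
--                 partes[i] = reemplazo
--
--     return "_".join(partes)
-- ===== SOURCE B (Python) =====
-- def reemplazar_sinonimos(nombre: str) -> str:
--     """Reemplaza palabras por sinonimos estandarizados."""
--     grupos = {
--       "ventas": ["facturacion", "ingresos"],
--       "compras": ["compra"],
--       "productos": ["articulos", "articulo", "item", "items"],
--       "vendedor": ["comercial"],
--       "sucursal": ["local", "tienda"],
--       "cantidad": ["volumen"],
--       "mejores": ["top"],
--     }
--     rev = {s: canon for canon, sinonimos in grupos.items() for s in sinonimos}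
--     return "_".join(rev.get(w, w) for w in nombre.split("_"))
-- ===== Notes on version B (the rewrite author's own statement) =====
-- stated objective: idiomatic
-- what changed: B inverts the synonym table once into a reverse dict (synonym -> canonical) and maps each word through one dict lookup in a single join-over-comprehension pass, eliminating A's in-place list mutation and its per-word scan over all groups.
import Mathlib
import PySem

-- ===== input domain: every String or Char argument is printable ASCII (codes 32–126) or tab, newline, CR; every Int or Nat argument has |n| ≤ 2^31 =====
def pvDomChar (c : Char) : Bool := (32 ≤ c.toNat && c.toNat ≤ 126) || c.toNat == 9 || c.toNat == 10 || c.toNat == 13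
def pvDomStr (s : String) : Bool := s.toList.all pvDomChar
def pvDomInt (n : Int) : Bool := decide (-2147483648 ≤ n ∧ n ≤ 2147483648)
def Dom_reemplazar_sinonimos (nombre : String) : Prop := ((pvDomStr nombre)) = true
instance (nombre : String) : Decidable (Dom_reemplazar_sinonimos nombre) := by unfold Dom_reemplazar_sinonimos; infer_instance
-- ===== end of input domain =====

-- B replaces A's in-place mutation of the word list (a scan over all 7 synonym groups per word)
-- by a reverse synonym->canonical index built once plus one map-and-join pass (objective: idiomatic).

-- the synonym table both Pythons carry as a literal dict
def pvGrupos : List (String × List String) :=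
  [("ventas", ["facturacion", "ingresos"]),
   ("compras", ["compra"]),
   ("productos", ["articulos", "articulo", "item", "items"]),
   ("vendedor", ["comercial"]),
   ("sucursal", ["local", "tienda"]),
   ("cantidad", ["volumen"]),
   ("mejores", ["top"])]

-- ===== PORT A =====
-- partes = nombre.split("_"); for i, palabra in enumerate(partes):
--   for reemplazo, sinonimos in grupos.items(): if palabra in sinonimos: partes[i] = reemplazo
-- (split? is some for the non-empty separator "_", so .getD [] never fires)
def reemplazar_sinonimos (nombre : String) : String :=
  let partes := (PySem.Str.split? nombre "_").getD []
  let partes :=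
    (PySem.List.enumerate partes).foldl
      (fun ps ip =>
        pvGrupos.foldl
          (fun ps' g => if g.2.contains ip.2 then ps'.set ip.1.toNat g.1 else ps')
          ps)
      partes
  PySem.Str.join "_" partes

-- ===== PORT B =====
-- rev = {s: canon for canon, sinonimos in grupos.items() for s in sinonimos}
def pvRev : PySem.Dict String String :=
  pvGrupos.foldl (fun d g => g.2.foldl (fun d' s => d'.insert s g.1) d) PySem.Dict.empty

-- "_".join(rev.get(w, w) for w in nombre.split("_"))
def reemplazar_sinonimos_alt (nombre : String) : String :=
  PySem.Str.join "_" (((PySem.Str.split? nombre "_").getD []).map (fun w => pvRev.getD w w))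

-- ===== PRECONDITION & SPEC =====
def Spec_reemplazar_sinonimos (nombre : String) (out : String) : Prop := out = reemplazar_sinonimos_alt nombre
instance (nombre : String) (out : String) : Decidable (Spec_reemplazar_sinonimos nombre out) := by unfold Spec_reemplazar_sinonimos; infer_instance

-- ===== CLAIM (what is proved, stated in full; the proofs are below) =====
def Claim_equal_reemplazar_sinonimos : Prop := ∀ (nombre : String), Dom_reemplazar_sinonimos nombre → Spec_reemplazar_sinonimos nombre (reemplazar_sinonimos nombre)

-- ===== LEMMAS AND PROOFS =====

-- per-word value of A's inner loop: the last group whose synonyms contain w, else w itself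
def pvWordA (w : String) : String :=
  pvGrupos.foldl (fun cur g => if g.2.contains w then g.1 else cur) w

-- A's inner loop over any group list, started on a list whose i-th entry is present,
-- just overwrites index i with the folded word value
theorem inner_fold_set (gs : List (String × List String)) (w : String) :
    ∀ (ps : List String) (i : Nat) (cur : String), ps[i]? = some cur →
      gs.foldl (fun ps' g => if g.2.contains w then ps'.set i g.1 else ps') ps
        = ps.set i (gs.foldl (fun c g => if g.2.contains w then g.1 else c) cur) := by
  induction gs with
  | nil =>
      intro ps i cur h
      obtain ⟨hi, he⟩ := List.getElem?_eq_some_iff.mp h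
      subst he
      exact (List.set_getElem_self ..).symm
  | cons g gs ih =>
      intro ps i cur h
      by_cases hc : g.2.contains w
      · simp only [List.foldl_cons, hc, if_true]
        have hi : i < ps.length := (List.getElem?_eq_some_iff.mp h).1
        rw [ih (ps.set i g.1) i g.1 (by simp [hi]), List.set_set]
      · simp only [List.foldl_cons, hc]
        exact ih ps i cur h

-- A's outer loop over enumerate(partes) is a map of pvWordA over partes
theorem outer_fold_map : ∀ (ps : List String),
    (PySem.List.enumerate ps).foldl
      (fun ps' ip =>
        pvGrupos.foldl
          (fun ps'' g => if g.2.contains ip.2 then ps''.set ip.1.toNat g.1 else ps'')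
          ps')
      ps = ps.map pvWordA := by
  -- generalize: the already-processed prefix is mapped, the loop runs on the tail
  suffices h : ∀ (tail pre : List String),
      (PySem.List.enumerate tail (pre.length : Int)).foldl
        (fun ps' ip =>
          pvGrupos.foldl
            (fun ps'' g => if g.2.contains ip.2 then ps''.set ip.1.toNat g.1 else ps'')
            ps')
        (pre ++ tail) = pre ++ tail.map pvWordA by
    intro ps
    simpa using h ps []
  intro tail
  induction tail with
  | nil => intro pre; simp [PySem.List.enumerate_nil]
  | cons w ws ih =>
      intro pre
      rw [PySem.List.enumerate_cons, List.foldl_cons]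
      rw [inner_fold_set pvGrupos w (pre ++ w :: ws) ((pre.length : Int)).toNat w
            (by simp)]
      have hset : (pre ++ w :: ws).set ((pre.length : Int)).toNat
          (pvGrupos.foldl (fun c g => if g.2.contains w then g.1 else c) w)
          = (pre ++ [pvWordA w]) ++ ws := by
        simp [pvWordA, List.set_append_right, List.append_assoc]
      rw [hset]
      have := ih (pre ++ [pvWordA w])
      simpa [List.append_assoc, add_comm] using this

-- the reverse-dict lookup agrees with A's per-word scan (synonyms are disjoint across groups)
theorem word_eq (w : String) : pvRev.getD w w = pvWordA w := by
  have hrev : pvRev = PySem.Dict.mk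
      [("facturacion", "ventas"), ("ingresos", "ventas"), ("compra", "compras"),
       ("articulos", "productos"), ("articulo", "productos"), ("item", "productos"),
       ("items", "productos"), ("comercial", "vendedor"), ("local", "sucursal"),
       ("tienda", "sucursal"), ("volumen", "cantidad"), ("top", "mejores")] := by rfl
  rw [hrev]
  by_cases h1 : w = "facturacion"; · subst h1; rfl
  by_cases h2 : w = "ingresos"; · subst h2; rfl
  by_cases h3 : w = "compra"; · subst h3; rfl
  by_cases h4 : w = "articulos"; · subst h4; rfl
  by_cases h5 : w = "articulo"; · subst h5; rfl
  by_cases h6 : w = "item"; · subst h6; rfl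
  by_cases h7 : w = "items"; · subst h7; rfl
  by_cases h8 : w = "comercial"; · subst h8; rfl
  by_cases h9 : w = "local"; · subst h9; rfl
  by_cases h10 : w = "tienda"; · subst h10; rfl
  by_cases h11 : w = "volumen"; · subst h11; rfl
  by_cases h12 : w = "top"; · subst h12; rfl
  simp only [pvWordA, pvGrupos, List.foldl_cons, List.foldl_nil, List.contains_cons,
    List.contains_nil, Bool.or_false, PySem.Dict.getD, PySem.Dict.get?_mk_cons]
  have hne1 : ∀ a : String, w ≠ a → (a == w) = false := fun a h => by
    simp; exact fun e => h e.symm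
  have hne2 : ∀ a : String, w ≠ a → (w == a) = false := fun a h => by simp [h]
  simp_all
  rfl

-- ===== VERDICT (by name: the statement is the Claim_ definition above) =====
theorem reemplazar_sinonimos_spec : Claim_equal_reemplazar_sinonimos := by
  intro nombre _
  unfold Spec_reemplazar_sinonimos reemplazar_sinonimos reemplazar_sinonimos_alt
  dsimp only
  rw [outer_fold_map]
  exact congrArg _ (List.map_congr_left (fun w _ => (word_eq w).symm))
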